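-- pv_equiv track=rewrite | github.com/joshanashakya/dissertation | workspace/dataset/java-python/GeeksForGeeks/2191/A/2.py | totalPairs
-- ===== SOURCE A (Python) =====
-- def digitSum(n):
--
--     Sum = 0
--     while n > 0:
--         Sum += n % 10
--         n = n // 10
--
--     return Sum
--
-- def totalPairs(arr1, arr2, n, m):
--
--     # set is used to avoid duplicate pairs
--     s = set()
--
--     for i in range(0, n):
--         for j in range(0, m):
--
--             # check sum of digits
--             # of both the elements
--             if digitSum(arr1[i]) == digitSum(arr2[j]):
--
--                 if arr1[i] < arr2[j]:
--                     s.add((arr1[i], arr2[j]))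
--                 else:
--                     s.add((arr2[j], arr1[i]))
--
--     # return size of the set
--     return len(s)
-- ===== SOURCE B (Python) =====
-- def digitSum(n):
--     Sum = 0
--     while n > 0:
--         Sum += n % 10
--         n = n // 10
--     return Sum
--
--
-- def totalPairs(arr1, arr2, n, m):
--     # Count by inclusion-exclusion over the distinct values instead of
--     # materialising a set of pairs: every digit-sum match between the
--     # distinct prefixes yields one pair, minus one for each unordered
--     # pair {x, y} (x < y, equal digit sums) with both values common to
--     # both sides, which would otherwise be counted twice.
--     u1 = set(arr1[:max(n, 0)])
--     u2 = set(arr2[:max(m, 0)])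
--     matches = sum(1 for a in u1 for b in u2 if digitSum(a) == digitSum(b))
--     both = u1 & u2
--     overlaps = sum(1 for x in both for y in both
--                    if x < y and digitSum(x) == digitSum(y))
--     return matches - overlaps
-- ===== Notes on version B (the rewrite author's own statement) =====
-- stated objective: faster
-- what changed: B never materialises a set of (min,max) tuples: it dedups each prefix once and counts digit-sum matches between the distinct values directly, subtracting by inclusion-exclusion one count for each unordered pair {x<y} of equal-digit-sum values common to both sides (the pairs A's set would merge), so its cost depends on the number of distinct values, not n*m.
import Mathlib
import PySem

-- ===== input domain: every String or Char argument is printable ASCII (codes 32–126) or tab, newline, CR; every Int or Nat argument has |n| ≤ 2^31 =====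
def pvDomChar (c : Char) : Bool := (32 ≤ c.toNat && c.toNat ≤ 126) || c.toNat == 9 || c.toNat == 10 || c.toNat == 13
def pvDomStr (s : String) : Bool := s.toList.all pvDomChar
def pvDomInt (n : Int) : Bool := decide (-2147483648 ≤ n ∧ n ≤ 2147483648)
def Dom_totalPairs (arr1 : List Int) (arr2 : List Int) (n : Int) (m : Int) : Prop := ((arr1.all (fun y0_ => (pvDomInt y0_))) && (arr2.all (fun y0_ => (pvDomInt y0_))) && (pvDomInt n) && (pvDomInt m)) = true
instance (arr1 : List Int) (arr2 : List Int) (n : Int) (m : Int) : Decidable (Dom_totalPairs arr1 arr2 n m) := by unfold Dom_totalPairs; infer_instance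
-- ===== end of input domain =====

-- B counts pairs by inclusion-exclusion over deduplicated prefixes instead of building A's set of (min,max) tuples.


-- ===== PORT A =====
-- while Sum/n loop of digitSum (shared helper of both Python versions)
-- fuel n.toNat always suffices: n strictly decreases while 0 < n
def digitSumGo (fuel : Nat) (n Sum : Int) : Int :=
  match fuel with
  | 0 => Sum
  | fuel + 1 =>
    if 0 < n then digitSumGo fuel (PySem.Int.floordiv n 10) (Sum + PySem.Int.mod n 10) else Sum

def digitSum (n : Int) : Int := digitSumGo n.toNat n 0

def totalPairs (arr1 : List Int) (arr2 : List Int) (n : Int) (m : Int) : Int :=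
  let s : PySem.Set (Int × Int) :=
    (PySem.List.pyRange 0 n 1).foldl (fun s i =>
      (PySem.List.pyRange 0 m 1).foldl (fun s j =>
        if digitSum (PySem.List.pyGetD arr1 i 0) = digitSum (PySem.List.pyGetD arr2 j 0) then
          if PySem.List.pyGetD arr1 i 0 < PySem.List.pyGetD arr2 j 0 then
            PySem.Set.add s (PySem.List.pyGetD arr1 i 0, PySem.List.pyGetD arr2 j 0)
          else
            PySem.Set.add s (PySem.List.pyGetD arr2 j 0, PySem.List.pyGetD arr1 i 0)
        else s) s) PySem.Set.empty
  (PySem.Set.len s : Int)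

-- ===== PORT B =====
def totalPairs_alt (arr1 : List Int) (arr2 : List Int) (n : Int) (m : Int) : Int :=
  let u1 : PySem.Set Int := PySem.Set.ofList (PySem.List.slice arr1 none (some (max n 0)))
  let u2 : PySem.Set Int := PySem.Set.ofList (PySem.List.slice arr2 none (some (max m 0)))
  let cnt : Int :=
    (u1.map (fun a => (u2.map (fun b => if digitSum a = digitSum b then (1 : Int) else 0)).sum)).sum
  let both : PySem.Set Int := PySem.Set.inter u1 u2
  let overlaps : Int :=
    (both.map (fun x =>
      (both.map (fun y => if x < y ∧ digitSum x = digitSum y then (1 : Int) else 0)).sum)).sum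
  cnt - overlaps

-- ===== PRECONDITION & SPEC =====
-- A raises IndexError exactly when both loops run (0 < n and 0 < m) and an index reaches past an array.
def Pre_totalPairs (arr1 : List Int) (arr2 : List Int) (n : Int) (m : Int) : Prop :=
  0 < n → 0 < m → (n ≤ arr1.length ∧ m ≤ arr2.length)
instance (arr1 : List Int) (arr2 : List Int) (n : Int) (m : Int) : Decidable (Pre_totalPairs arr1 arr2 n m) := by unfold Pre_totalPairs; infer_instance

def pvWitness_totalPairs : List Int × List Int × Int × Int := ([12, 21, 3], [21, 30, 3], 3, 2)

def Spec_totalPairs (arr1 : List Int) (arr2 : List Int) (n : Int) (m : Int) (out : Int) : Prop := out = totalPairs_alt arr1 arr2 n m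
instance (arr1 : List Int) (arr2 : List Int) (n : Int) (m : Int) (out : Int) : Decidable (Spec_totalPairs arr1 arr2 n m out) := by unfold Spec_totalPairs; infer_instance

-- ===== CLAIM (what is proved, stated in full; the proofs are below) =====
def Claim_equal_totalPairs : Prop := ∀ (arr1 : List Int) (arr2 : List Int) (n : Int) (m : Int), Dom_totalPairs arr1 arr2 n m → Pre_totalPairs arr1 arr2 n m → Spec_totalPairs arr1 arr2 n m (totalPairs arr1 arr2 n m)

-- ===== LEMMAS AND PROOFS =====

-- normalisation of a pair to (min, max), as A's two add-branches compute it
def pvF (p : Int × Int) : Int × Int := if p.1 < p.2 then p else (p.2, p.1)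

-- the digit-sum-matching pairs of two finite sets, and the double-counted overlaps
def pvP (S1 S2 : Finset Int) : Finset (Int × Int) :=
  (S1 ×ˢ S2).filter (fun p => digitSum p.1 = digitSum p.2)

def pvT (S1 S2 : Finset Int) : Finset (Int × Int) :=
  ((S1 ∩ S2) ×ˢ (S1 ∩ S2)).filter (fun p => p.1 < p.2 ∧ digitSum p.1 = digitSum p.2)

-- the list of normalised pairs A's nested loops feed into its set
def bigList (arr1 arr2 : List Int) (n m : Int) : List (Int × Int) :=
  (PySem.List.pyRange 0 n 1).flatMap (fun i =>
    ((PySem.List.pyRange 0 m 1).filter (fun j =>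
        decide (digitSum (PySem.List.pyGetD arr1 i 0) = digitSum (PySem.List.pyGetD arr2 j 0)))).map
      (fun j => pvF (PySem.List.pyGetD arr1 i 0, PySem.List.pyGetD arr2 j 0)))

-- A's inner loop = one Set.update with the filtered, normalised pairs
lemma foldl_ite_add2 (l : List Int) (c : Int → Prop) [DecidablePred c] (g h : Int → Int)
    (s : PySem.Set (Int × Int)) :
    l.foldl (fun s b => if c b then
        (if g b < h b then PySem.Set.add s (g b, h b) else PySem.Set.add s (h b, g b)) else s) s
      = PySem.Set.update s ((l.filter (fun b => decide (c b))).map (fun b => pvF (g b, h b))) := by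
  induction l generalizing s with
  | nil => simp [PySem.Set.update_nil]
  | cons x xs ih =>
      by_cases hc : c x
      · have hadd : (if g x < h x then PySem.Set.add s (g x, h x) else PySem.Set.add s (h x, g x))
            = PySem.Set.add s (pvF (g x, h x)) := by
          unfold pvF; split <;> rfl
        rw [List.foldl_cons, if_pos hc, hadd, List.filter_cons_of_pos (by simpa using hc),
          List.map_cons, PySem.Set.update_cons]
        exact ih _
      · rw [List.foldl_cons, if_neg hc, List.filter_cons_of_neg (by simpa using hc)]
        exact ih s

-- A's outer loop = one Set.update with the concatenation of the inner lists
lemma foldl_update (l : List Int) (g : Int → List (Int × Int)) (s : PySem.Set (Int × Int)) :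
    l.foldl (fun s i => PySem.Set.update s (g i)) s = PySem.Set.update s (l.flatMap g) := by
  induction l generalizing s with
  | nil => simp [PySem.Set.update_nil]
  | cons x xs ih => simp [List.flatMap_cons, PySem.Set.update_append, ih]

lemma foldA_eq (arr1 arr2 : List Int) (n m : Int) :
    totalPairs arr1 arr2 n m = PySem.Set.len (PySem.Set.ofList (bigList arr1 arr2 n m)) := by
  unfold totalPairs
  have hinner : ∀ (s : PySem.Set (Int × Int)) (i : Int),
      (PySem.List.pyRange 0 m 1).foldl (fun s j =>
        if digitSum (PySem.List.pyGetD arr1 i 0) = digitSum (PySem.List.pyGetD arr2 j 0) then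
          if PySem.List.pyGetD arr1 i 0 < PySem.List.pyGetD arr2 j 0 then
            PySem.Set.add s (PySem.List.pyGetD arr1 i 0, PySem.List.pyGetD arr2 j 0)
          else
            PySem.Set.add s (PySem.List.pyGetD arr2 j 0, PySem.List.pyGetD arr1 i 0)
        else s) s
      = PySem.Set.update s (((PySem.List.pyRange 0 m 1).filter (fun j =>
          decide (digitSum (PySem.List.pyGetD arr1 i 0) = digitSum (PySem.List.pyGetD arr2 j 0)))).map
            (fun j => pvF (PySem.List.pyGetD arr1 i 0, PySem.List.pyGetD arr2 j 0))) := by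
    intro s i
    exact foldl_ite_add2 (PySem.List.pyRange 0 m 1)
      (fun j => digitSum (PySem.List.pyGetD arr1 i 0) = digitSum (PySem.List.pyGetD arr2 j 0))
      (fun _ => PySem.List.pyGetD arr1 i 0) (fun j => PySem.List.pyGetD arr2 j 0) s
  simp only [hinner]
  rw [foldl_update, PySem.Set.update_empty]
  rfl

lemma len_ofList_eq_card (X : List (Int × Int)) :
    PySem.Set.len (PySem.Set.ofList X) = (X.toFinset.card : Int) := by
  have h1 : (PySem.Set.ofList X).toFinset = X.toFinset := by
    ext q; simp [List.mem_toFinset, PySem.Set.mem_ofList]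
  have h2 := List.toFinset_card_of_nodup (PySem.Set.nodup_ofList X)
  rw [h1] at h2
  simp [PySem.Set.len, ← h2]

-- membership in a take-prefix via a Python index
lemma mem_take_iff_pyGetD (l : List Int) (N : Nat) (hN : N ≤ l.length) (a : Int) :
    a ∈ l.take N ↔ ∃ i : Int, 0 ≤ i ∧ i < (N : Int) ∧ PySem.List.pyGetD l i 0 = a := by
  rw [List.mem_take_iff_getElem]
  constructor
  · rintro ⟨k, hk, rfl⟩
    refine ⟨(k : Int), by omega, by omega, ?_⟩
    rw [PySem.List.pyGetD_of_nonneg l 0 (by omega)]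
    simp only [Int.toNat_natCast]
    exact List.getD_eq_getElem l 0 (by omega)
  · rintro ⟨i, hi0, hiN, rfl⟩
    refine ⟨i.toNat, by omega, ?_⟩
    rw [PySem.List.pyGetD_of_nonneg l 0 hi0]
    rw [List.getD_eq_getElem l 0 (by omega)]

lemma bigList_toFinset (arr1 arr2 : List Int) (n m : Int)
    (hpre : Pre_totalPairs arr1 arr2 n m) :
    (bigList arr1 arr2 n m).toFinset
      = (pvP (arr1.take (max n 0).toNat).toFinset (arr2.take (max m 0).toNat).toFinset).image pvF := by
  by_cases hn : 0 < n
  · by_cases hm : 0 < m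
    · obtain ⟨h1, h2⟩ := hpre hn hm
      ext q
      simp only [List.mem_toFinset, bigList, List.mem_flatMap, List.mem_map, List.mem_filter,
        Finset.mem_image, pvP, Finset.mem_filter, Finset.mem_product,
        PySem.List.mem_pyRange_one, decide_eq_true_eq,
        mem_take_iff_pyGetD arr1 (max n 0).toNat (by omega),
        mem_take_iff_pyGetD arr2 (max m 0).toNat (by omega)]
      constructor
      · rintro ⟨i, ⟨hi0, hin⟩, j, ⟨⟨hj0, hjm⟩, hds⟩, rfl⟩
        exact ⟨(PySem.List.pyGetD arr1 i 0, PySem.List.pyGetD arr2 j 0),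
          ⟨⟨⟨i, hi0, by omega, rfl⟩, ⟨j, hj0, by omega, rfl⟩⟩, hds⟩, rfl⟩
      · rintro ⟨⟨a, b⟩, ⟨⟨⟨i, hi0, hin, ha⟩, ⟨j, hj0, hjm, hb⟩⟩, hds⟩, rfl⟩
        exact ⟨i, ⟨hi0, by omega⟩, j, ⟨⟨hj0, by omega⟩, by rw [ha, hb]; exact hds⟩,
          by rw [ha, hb]⟩
    · have hm' : m ≤ 0 := by omega
      have hbig : bigList arr1 arr2 n m = [] := by
        simp [bigList, PySem.List.pyRange_one_eq_nil hm']
      have htake : (max m 0).toNat = 0 := by omega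
      simp [hbig, pvP, htake]
  · have hn' : n ≤ 0 := by omega
    have hbig : bigList arr1 arr2 n m = [] := by
      simp [bigList, PySem.List.pyRange_one_eq_nil hn']
    have htake : (max n 0).toNat = 0 := by omega
    simp [hbig, pvP, htake]

-- B's value, unconditionally: matches minus overlaps, as Finset cardinalities
lemma altB_eq (arr1 arr2 : List Int) (n m : Int) :
    totalPairs_alt arr1 arr2 n m
      = ((pvP (arr1.take (max n 0).toNat).toFinset (arr2.take (max m 0).toNat).toFinset).card : Int)
        - ((pvT (arr1.take (max n 0).toNat).toFinset (arr2.take (max m 0).toNat).toFinset).card : Int) := by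
  simp only [totalPairs_alt]
  rw [PySem.List.slice_to arr1 (le_max_right n 0), PySem.List.slice_to arr2 (le_max_right m 0)]
  set t1 := arr1.take (max n 0).toNat with ht1
  set t2 := arr2.take (max m 0).toNat with ht2
  set u1 : PySem.Set Int := PySem.Set.ofList t1 with hu1
  set u2 : PySem.Set Int := PySem.Set.ofList t2 with hu2
  have hU1 : u1.toFinset = t1.toFinset := by ext x; simp [hu1, PySem.Set.mem_ofList]
  have hU2 : u2.toFinset = t2.toFinset := by ext x; simp [hu2, PySem.Set.mem_ofList]
  set both : PySem.Set Int := PySem.Set.inter u1 u2 with hboth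
  have hB : both.toFinset = t1.toFinset ∩ t2.toFinset := by
    ext x
    simp [hboth, PySem.Set.mem_inter, hu1, hu2, PySem.Set.mem_ofList]
  have hcnt : (u1.map (fun a => (u2.map (fun b =>
      if digitSum a = digitSum b then (1 : Int) else 0)).sum)).sum
      = ((pvP t1.toFinset t2.toFinset).card : Int) := by
    rw [← List.sum_toFinset _ (PySem.Set.nodup_ofList t1), hU1]
    have hin : ∀ a : Int, (u2.map (fun b =>
        if digitSum a = digitSum b then (1 : Int) else 0)).sum
        = ∑ b ∈ t2.toFinset, if digitSum a = digitSum b then (1 : Int) else 0 := by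
      intro a
      rw [← List.sum_toFinset _ (PySem.Set.nodup_ofList t2), hU2]
    simp only [hin]
    rw [← Finset.sum_product' t1.toFinset t2.toFinset
      (fun a b => if digitSum a = digitSum b then (1 : Int) else 0)]
    rw [Finset.sum_boole (fun p : Int × Int => digitSum p.1 = digitSum p.2)]
    rfl
  have hnodupB : both.Nodup := PySem.Set.nodup_inter u1 u2 (PySem.Set.nodup_ofList t1)
  have hov : (both.map (fun x => (both.map (fun y =>
      if x < y ∧ digitSum x = digitSum y then (1 : Int) else 0)).sum)).sum
      = ((pvT t1.toFinset t2.toFinset).card : Int) := by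
    rw [← List.sum_toFinset _ hnodupB, hB]
    have hin : ∀ x : Int, (both.map (fun y =>
        if x < y ∧ digitSum x = digitSum y then (1 : Int) else 0)).sum
        = ∑ y ∈ t1.toFinset ∩ t2.toFinset, if x < y ∧ digitSum x = digitSum y then (1 : Int) else 0 := by
      intro x
      rw [← List.sum_toFinset _ hnodupB, hB]
    simp only [hin]
    rw [← Finset.sum_product' (t1.toFinset ∩ t2.toFinset) (t1.toFinset ∩ t2.toFinset)
      (fun x y => if x < y ∧ digitSum x = digitSum y then (1 : Int) else 0)]
    rw [Finset.sum_boole (fun p : Int × Int => p.1 < p.2 ∧ digitSum p.1 = digitSum p.2)]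
    rfl
  rw [hcnt, hov]

-- the counting identity: |image of normalisation| + |overlaps| = |matches|
lemma card_image_pvF (S1 S2 : Finset Int) :
    ((pvP S1 S2).image pvF).card + (pvT S1 S2).card = (pvP S1 S2).card := by
  classical
  set P := pvP S1 S2 with hP
  set T' := P.filter (fun p => p.2 < p.1 ∧ (p.2, p.1) ∈ P) with hT'
  have himg : P.image pvF = (P \ T').image pvF := by
    apply Finset.Subset.antisymm
    · intro q hq
      obtain ⟨p, hp, hfp⟩ := Finset.mem_image.mp hq
      by_cases hT : p ∈ T'
      · obtain ⟨hpP, hlt, hswap⟩ := Finset.mem_filter.mp hT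
        refine Finset.mem_image.mpr ⟨(p.2, p.1), Finset.mem_sdiff.mpr ⟨hswap, ?_⟩, ?_⟩
        · intro hmem
          obtain ⟨_, hlt2, _⟩ := Finset.mem_filter.mp hmem
          simp only at hlt2
          omega
        · rw [← hfp]
          unfold pvF
          simp only
          rw [if_pos hlt, if_neg (by omega)]
      · exact Finset.mem_image.mpr ⟨p, Finset.mem_sdiff.mpr ⟨hp, hT⟩, hfp⟩
    · exact Finset.image_subset_image (Finset.sdiff_subset)
  have hinj : Set.InjOn pvF (P \ T' : Finset (Int × Int)) := by
    rintro ⟨a, b⟩ hp ⟨c, d⟩ hq heq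
    obtain ⟨hpP, hpT⟩ := Finset.mem_sdiff.mp hp
    obtain ⟨hqP, hqT⟩ := Finset.mem_sdiff.mp hq
    unfold pvF at heq
    simp only at heq
    by_cases h1 : a < b <;> by_cases h2 : c < d
    · rwa [if_pos h1, if_pos h2] at heq
    · rw [if_pos h1, if_neg h2] at heq
      obtain ⟨he1, he2⟩ := Prod.ext_iff.mp heq
      simp only at he1 he2
      exfalso
      apply hqT
      rw [hT', Finset.mem_filter]
      refine ⟨hqP, by simp only; omega, ?_⟩
      simp only
      rw [show ((c, d).2, (c, d).1) = (a, b) by simp [← he1, ← he2]]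
      exact hpP
    · rw [if_neg h1, if_pos h2] at heq
      obtain ⟨he1, he2⟩ := Prod.ext_iff.mp heq
      simp only at he1 he2
      exfalso
      apply hpT
      rw [hT', Finset.mem_filter]
      refine ⟨hpP, by simp only; omega, ?_⟩
      simp only
      rw [show ((a, b).2, (a, b).1) = (c, d) by simp [he1, he2]]
      exact hqP
    · rw [if_neg h1, if_neg h2] at heq
      obtain ⟨he1, he2⟩ := Prod.ext_iff.mp heq
      simp only at he1 he2
      simp [he1, he2]
  have hcard1 : (P.image pvF).card = P.card - T'.card := by
    rw [himg, Finset.card_image_of_injOn hinj,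
      Finset.card_sdiff_of_subset (Finset.filter_subset _ _)]
  have hTT' : (pvT S1 S2).card = T'.card := by
    apply Finset.card_bij (fun p _ => (p.2, p.1))
    · rintro ⟨x, y⟩ hxy
      obtain ⟨hmem, hlt, hds⟩ := Finset.mem_filter.mp hxy
      obtain ⟨hx, hy⟩ := Finset.mem_product.mp hmem
      obtain ⟨hx1, hx2⟩ := Finset.mem_inter.mp hx
      obtain ⟨hy1, hy2⟩ := Finset.mem_inter.mp hy
      rw [hT', Finset.mem_filter]
      refine ⟨?_, ?_, ?_⟩
      · rw [hP]; unfold pvP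
        rw [Finset.mem_filter]
        exact ⟨Finset.mem_product.mpr ⟨hy1, hx2⟩, hds.symm⟩
      · simpa using hlt
      · rw [hP]; unfold pvP
        rw [Finset.mem_filter]
        exact ⟨Finset.mem_product.mpr ⟨hx1, hy2⟩, hds⟩
    · rintro ⟨x1, y1⟩ h1 ⟨x2, y2⟩ h2 heq
      obtain ⟨he1, he2⟩ := Prod.ext_iff.mp heq
      simp only at he1 he2
      simp [he1, he2]
    · rintro ⟨a, b⟩ hab
      obtain ⟨habP, hlt, hswap⟩ := Finset.mem_filter.mp hab
      simp only at hlt hswap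
      refine ⟨(b, a), ?_, rfl⟩
      rw [hP] at habP hswap
      unfold pvP at habP hswap
      obtain ⟨hmem1, hds1⟩ := Finset.mem_filter.mp habP
      obtain ⟨hmem2, _⟩ := Finset.mem_filter.mp hswap
      obtain ⟨ha1, hb2⟩ := Finset.mem_product.mp hmem1
      obtain ⟨hb1, ha2⟩ := Finset.mem_product.mp hmem2
      unfold pvT
      rw [Finset.mem_filter]
      refine ⟨Finset.mem_product.mpr ⟨Finset.mem_inter.mpr ⟨hb1, hb2⟩,
        Finset.mem_inter.mpr ⟨ha1, ha2⟩⟩, by simp only; omega, ?_⟩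
      simp only at hds1 ⊢
      exact hds1.symm
  have hle : T'.card ≤ P.card := Finset.card_filter_le _ _
  omega

-- ===== VERDICT (by name: the statement is the Claim_ definition above) =====
theorem totalPairs_spec : Claim_equal_totalPairs := by
  intro arr1 arr2 n m _ hpre
  unfold Spec_totalPairs
  rw [foldA_eq, len_ofList_eq_card, altB_eq, bigList_toFinset arr1 arr2 n m hpre]
  have h := card_image_pvF (arr1.take (max n 0).toNat).toFinset (arr2.take (max m 0).toNat).toFinset
  omega
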